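-- pv_equiv track=rewrite | github.com/hosung-222/Coding-Test | 프로그래머스/lv3/12987. 숫자 게임/숫자 게임.py | solution
-- ===== SOURCE A (Python) =====
-- from collections import deque
--
-- def solution(A, B):
--     answer = 0
--     A.sort(reverse =True)
--     B.sort(reverse =True)
--     a = deque(A)
--     b = deque(B)
--     for i in range(len(A)):
--         if a[0] >= b[0]:
--             a.popleft()
--             b.pop()
--         elif b[0] > a[0]:
--             a.popleft()
--             b.popleft()
--             answer += 1
--     return answer
-- ===== SOURCE B (Python) =====
-- def solution(A, B):
--     A.sort(reverse=True)
--     B.sort(reverse=True)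
--     count = 0
--     i = len(A) - 1
--     for b in reversed(B):
--         if i >= 0 and b > A[i]:
--             count += 1
--             i -= 1
--     return count
-- ===== Notes on version B (the rewrite author's own statement) =====
-- stated objective: simpler
-- what changed: Replaced the double-ended deque consumption (compare fronts, pop A's front and either B's front or B's back) by a single two-pointer scan from the smallest elements upward with one integer index into A, no deques and only one comparison per step.
import Mathlib
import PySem

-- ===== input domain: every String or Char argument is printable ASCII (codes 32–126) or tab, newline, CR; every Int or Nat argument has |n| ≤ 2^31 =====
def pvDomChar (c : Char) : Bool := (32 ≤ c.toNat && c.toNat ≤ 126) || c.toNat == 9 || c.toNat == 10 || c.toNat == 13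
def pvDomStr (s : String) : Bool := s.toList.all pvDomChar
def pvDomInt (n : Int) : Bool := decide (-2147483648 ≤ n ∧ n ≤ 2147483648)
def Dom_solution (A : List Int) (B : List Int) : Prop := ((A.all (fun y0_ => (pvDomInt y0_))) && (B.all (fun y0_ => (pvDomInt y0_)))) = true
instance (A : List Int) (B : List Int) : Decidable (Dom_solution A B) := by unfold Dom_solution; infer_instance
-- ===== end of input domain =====

-- B replaces A's deque front/back popping by a single smallest-first two-pointer scan (simpler);
-- both versions sort their arguments in place descending, so the observable mutation is identical;
-- the equivalence proved here is about the return value.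

-- ===== PORT A =====
-- one loop iteration of A: state (deque a, deque b, answer); the range element is unused
def stepA (st : List Int × List Int × Int) (_ : Int) : List Int × List Int × Int :=
  let a := st.1
  let b := st.2.1
  let ans := st.2.2
  let a0 := (PySem.List.pyGet? a 0).getD 0
  let b0 := (PySem.List.pyGet? b 0).getD 0
  if a0 ≥ b0 then (a.tail, b.dropLast, ans)
  else if b0 > a0 then (a.tail, b.tail, ans + 1)
  else (a, b, ans)

def solution (A : List Int) (B : List Int) : Int :=
  let As := PySem.List.sorted A id true
  let Bs := PySem.List.sorted B id true
  ((PySem.List.pyRange 0 (As.length : Int) 1).foldl stepA (As, Bs, 0)).2.2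

-- ===== PORT B =====
-- one loop iteration of B: state (index i into the descending-sorted A, count); b is the current element of reversed(B)
def stepB (As : List Int) (st : Int × Int) (b : Int) : Int × Int :=
  if st.1 ≥ 0 ∧ b > (PySem.List.pyGet? As st.1).getD 0 then (st.1 - 1, st.2 + 1) else st

def solution_alt (A : List Int) (B : List Int) : Int :=
  let As := PySem.List.sorted A id true
  let Bs := PySem.List.sorted B id true
  (Bs.reverse.foldl (stepB As) ((As.length : Int) - 1, 0)).2

-- ===== PRECONDITION & SPEC =====
-- Pre_ excludes exactly the inputs where A raises IndexError: the loop pops one element of b per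
-- iteration and reads b[0] first, so A raises iff len(B) < len(A).
def Pre_solution (A : List Int) (B : List Int) : Prop := A.length ≤ B.length
instance (A : List Int) (B : List Int) : Decidable (Pre_solution A B) := by unfold Pre_solution; infer_instance
def pvWitness_solution : List Int × List Int := ([3, 1, 2], [2, 4, 1])

def Spec_solution (A : List Int) (B : List Int) (out : Int) : Prop := out = solution_alt A B
instance (A : List Int) (B : List Int) (out : Int) : Decidable (Spec_solution A B out) := by unfold Spec_solution; infer_instance

-- ===== CLAIM (what is proved, stated in full; the proofs are below) =====
def Claim_equal_solution : Prop := ∀ (A : List Int) (B : List Int), Dom_solution A B → Pre_solution A B → Spec_solution A B (solution A B)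

-- ===== LEMMAS AND PROOFS =====

-- A's loop as structural recursion on the descending-sorted deques
def fA : List Int → List Int → Int
  | [], _ => 0
  | x :: a, b => if x ≥ b.headD 0 then fA a b.dropLast else 1 + fA a b.tail

-- B's scan as structural recursion on the ascending (reversed) lists
def gB : List Int → List Int → Int
  | _, [] => 0
  | [], _ :: _ => 0
  | a :: as, b :: bs => if b > a then 1 + gB as bs else gB (a :: as) bs
  termination_by _ bs => bs.length
  decreasing_by all_goals simp

lemma gB_nil (bs : List Int) : gB [] bs = 0 := by
  cases bs <;> simp [gB]

-- an A-element x no B-element beats contributes nothing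
lemma gB_append_unbeatable (bs : List Int) : ∀ (as : List Int) (x : Int),
    (∀ b ∈ bs, b ≤ x) → gB (as ++ [x]) bs = gB as bs := by
  induction bs with
  | nil => intro as x _; simp [gB]
  | cons b bs' ih =>
    intro as x h
    cases as with
    | nil =>
      simp only [List.nil_append, gB]
      have hb : ¬ b > x := by have := h b (by simp); omega
      simp only [hb, if_false]
      have := ih [] x (fun e he => h e (by simp [he]))
      simpa [gB_nil] using this
    | cons a as' =>
      simp only [List.cons_append, gB]
      by_cases hba : b > a
      · simp only [hba, if_true]
        rw [ih as' x (fun e he => h e (by simp [he]))]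
      · simp only [hba, if_false]
        exact ih (a :: as') x (fun e he => h e (by simp [he]))

-- with spare B-elements the smallest one is redundant
lemma gB_drop_min : ∀ (as : List Int) (b : Int) (bs : List Int),
    List.Pairwise (· ≤ ·) (b :: bs) → as.length ≤ bs.length → gB as (b :: bs) = gB as bs := by
  intro as
  induction as with
  | nil => intro b bs _ _; simp [gB_nil]
  | cons a as' ih =>
    intro b bs hs hl
    simp only [gB]
    by_cases hba : b > a
    · simp only [hba, if_true]
      cases bs with
      | nil => simp at hl
      | cons b' bs'' =>
        have hbb' : b ≤ b' := (List.pairwise_cons.mp hs).1 b' (by simp)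
        simp only [gB, show b' > a by omega, if_true]
        rw [ih b' bs'' ((List.pairwise_cons.mp hs).2) (by simpa using hl)]
    · simp only [hba, if_false]

-- pairing the two maxima when B's max wins
lemma gB_pair_max (bs : List Int) : ∀ (as : List Int) (x y : Int),
    List.Pairwise (· ≤ ·) (as ++ [x]) → List.Pairwise (· ≤ ·) (bs ++ [y]) → x < y →
    gB (as ++ [x]) (bs ++ [y]) = 1 + gB as bs := by
  induction bs with
  | nil =>
    intro as x y ha _ hxy
    cases as with
    | nil => simp [gB, hxy]
    | cons a as' =>
      have hax : a ≤ x := by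
        have := (List.pairwise_cons.mp ha).1 x (by simp)
        exact this
      simp only [List.cons_append, List.nil_append, gB, show y > a by omega, if_true]
  | cons b bs' ih =>
    intro as x y ha hb hxy
    have hbtail : List.Pairwise (· ≤ ·) (bs' ++ [y]) := (List.pairwise_cons.mp (by simpa using hb)).2
    cases as with
    | nil =>
      simp only [List.nil_append, List.cons_append, gB]
      by_cases hbx : b > x
      · simp only [hbx, if_true, gB_nil]
      · simp only [hbx, if_false]
        have := ih [] x y (by simp) hbtail hxy
        simpa [gB_nil] using this
    | cons a as' =>
      have hatail : List.Pairwise (· ≤ ·) (as' ++ [x]) := (List.pairwise_cons.mp (by simpa using ha)).2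
      simp only [List.cons_append, gB]
      by_cases hba : b > a
      · simp only [hba, if_true]
        rw [ih as' x y hatail hbtail hxy]
      · simp only [hba, if_false]
        exact ih (a :: as') x y (by simpa using ha) hbtail hxy

-- the two greedies agree on descending-sorted inputs with enough B-elements
lemma fA_eq_gB : ∀ (la lb : List Int),
    List.Pairwise (fun a b => b ≤ a) la → List.Pairwise (fun a b => b ≤ a) lb →
    la.length ≤ lb.length → fA la lb = gB la.reverse lb.reverse := by
  intro la
  induction la with
  | nil => intro lb _ _ _; simp [fA, gB_nil]
  | cons x a ih =>
    intro lb hla hlb hlen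
    cases lb with
    | nil => simp at hlen
    | cons y b =>
      have hxa : ∀ e ∈ a, e ≤ x := (List.pairwise_cons.mp hla).1
      have hyb : ∀ e ∈ b, e ≤ y := (List.pairwise_cons.mp hlb).1
      simp only [fA, List.headD_cons]
      by_cases hxy : x ≥ y
      · simp only [hxy, if_true]
        have hrev : gB ((x :: a).reverse) ((y :: b).reverse)
            = gB (a.reverse) ((y :: b).reverse) := by
          rw [List.reverse_cons]
          exact gB_append_unbeatable _ _ _ (by
            intro e he
            rcases List.mem_cons.mp (List.mem_reverse.mp he) with h | h
            · omega
            · exact le_trans (hyb e h) hxy)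
        have hdrop : gB (a.reverse) ((y :: b).reverse) = gB (a.reverse) ((y :: b).dropLast.reverse) := by
          rcases hlast : (y :: b).reverse with _ | ⟨z, t⟩
          · simp at hlast
          · have ht : t = (y :: b).dropLast.reverse := by
              have := List.tail_reverse (l := y :: b)
              rw [hlast] at this
              simpa using this
            rw [← ht]
            apply gB_drop_min
            · rw [← hlast]
              rw [List.pairwise_reverse]
              simpa using hlb
            · have : (y :: b).reverse.length = b.length + 1 := by simp
              rw [hlast] at this
              simp at this hlen ⊢
              omega
        rw [hrev, hdrop]
        apply ih
        · exact (List.pairwise_cons.mp hla).2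
        · exact List.Pairwise.sublist (List.dropLast_sublist _) hlb
        · simp at hlen ⊢
          omega
      · simp only [hxy, if_false]
        rw [List.reverse_cons, List.reverse_cons, List.tail_cons]
        rw [gB_pair_max _ _ _ _ (by rw [← List.reverse_cons, List.pairwise_reverse]; exact hla)
              (by rw [← List.reverse_cons, List.pairwise_reverse]; exact hlb) (by omega)]
        rw [ih b (List.pairwise_cons.mp hla).2 (List.pairwise_cons.mp hlb).2
            (by simp at hlen ⊢; omega)]

-- A's fold over range(len(A)) computes fA
lemma foldA_eq_fA : ∀ (l : List Int) (a b : List Int) (ans : Int),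
    a.length = l.length → l.length ≤ b.length →
    ((l.foldl stepA (a, b, ans)).2.2 : Int) = ans + fA a b := by
  intro l
  induction l with
  | nil =>
    intro a b ans ha _
    rw [List.length_nil, List.length_eq_zero_iff] at ha
    subst ha
    simp [fA]
  | cons i l' ih =>
    intro a b ans ha hb
    cases a with
    | nil => simp at ha
    | cons x a' =>
      cases b with
      | nil => simp at hb
      | cons y b' =>
        simp only [List.foldl_cons]
        have hstep : stepA (x :: a', y :: b', ans) i
            = if x ≥ y then (a', (y :: b').dropLast, ans) else (a', b', ans + 1) := by
          simp only [stepA, PySem.List.pyGet?_zero_cons, Option.getD_some]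
          by_cases h : x ≥ y
          · simp [h]
          · simp [h, show y > x by omega]
        rw [hstep]
        by_cases h : x ≥ y
        · simp only [h, if_true]
          rw [ih a' ((y :: b').dropLast) ans (by simpa using ha)
               (by simp at hb ⊢; omega)]
          simp [fA, h]
        · simp only [h, if_false]
          rw [ih a' b' (ans + 1) (by simpa using ha) (by simp at hb ⊢; omega)]
          simp only [fA, List.headD_cons, h, if_false, List.tail_cons]
          ring
  
-- B's fold over reversed(B) computes gB on the reversed lists
lemma foldB_eq_gB (As : List Int) : ∀ (bs : List Int) (i c : Int),
    -1 ≤ i → i < As.length →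
    ((bs.foldl (stepB As) (i, c)).2 : Int) = c + gB ((As.take ((i + 1).toNat)).reverse) bs := by
  intro bs
  induction bs with
  | nil => intro i c _ _; simp [gB]
  | cons b bs' ih =>
    intro i c h1 h2
    by_cases hi : 0 ≤ i
    · have hn : i.toNat < As.length := by omega
      have htake : As.take ((i + 1).toNat) = As.take i.toNat ++ [As[i.toNat]] := by
        have : (i + 1).toNat = i.toNat + 1 := by omega
        rw [this, List.take_add_one, List.getElem?_eq_getElem hn]
        simp
      have hget : (PySem.List.pyGet? As i).getD 0 = As[i.toNat] := by
        rw [PySem.List.pyGet?_eq_some_getElem As hi (by exact_mod_cast h2)]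
        simp
      simp only [List.foldl_cons, stepB, hget]
      rw [htake, List.reverse_append, List.reverse_singleton, List.singleton_append]
      by_cases hb : b > As[i.toNat]
      · rw [if_pos (show i ≥ 0 ∧ b > As[i.toNat] from ⟨by omega, hb⟩)]
        rw [ih (i - 1) (c + 1) (by omega) (by omega)]
        have : (i - 1 + 1).toNat = i.toNat := by omega
        rw [this]
        simp only [gB, hb, if_true]
        ring
      · rw [if_neg (show ¬ (i ≥ 0 ∧ b > As[i.toNat]) from fun hc => hb hc.2)]
        rw [ih i c h1 h2]
        have : (i + 1).toNat = i.toNat + 1 := by omega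
        rw [this, List.take_add_one, List.getElem?_eq_getElem hn]
        simp only [Option.toList_some, List.reverse_append, List.reverse_singleton,
          List.singleton_append, gB, hb, if_false]
    · have : i = -1 := by omega
      subst this
      simp only [List.foldl_cons, stepB]
      simp only [show ¬ ((-1 : Int) ≥ 0 ∧ b > (PySem.List.pyGet? As (-1)).getD 0) by omega, if_false]
      rw [ih (-1) c (by omega) h2]
      simp [gB_nil]

-- ===== VERDICT (by name: the statement is the Claim_ definition above) =====
theorem solution_spec : Claim_equal_solution := by
  intro A B _ hpre
  unfold Spec_solution solution solution_alt
  set As := PySem.List.sorted A id true with hAs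
  set Bs := PySem.List.sorted B id true with hBs
  have hlen : As.length ≤ Bs.length := by
    rw [hAs, hBs, PySem.List.length_sorted, PySem.List.length_sorted]
    exact hpre
  have hA : ((PySem.List.pyRange 0 (As.length : Int) 1).foldl stepA (As, Bs, 0)).2.2 = fA As Bs := by
    rw [foldA_eq_fA _ As Bs 0 (by simp [PySem.List.length_pyRange_one]) (by simp [PySem.List.length_pyRange_one]; omega)]
    ring
  have hBfold : ((Bs.reverse.foldl (stepB As) ((As.length : Int) - 1, 0)).2 : Int)
      = gB As.reverse Bs.reverse := by
    rw [foldB_eq_gB As Bs.reverse ((As.length : Int) - 1) 0 (by omega) (by omega)]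
    have : ((As.length : Int) - 1 + 1).toNat = As.length := by omega
    rw [this, List.take_length]
    ring
  rw [hA, hBfold]
  exact fA_eq_gB As Bs (PySem.List.sorted_pairwise_rev A id) (PySem.List.sorted_pairwise_rev B id) hlen
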